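-- pv_equiv track=rewrite | github.com/cjackson98/CSE-231 | Projects/proj09.py | get_user_names
-- ===== SOURCE A (Python) =====
-- def get_user_names(data_list):
--     '''Creates a list of usernames from the file. Sorts alphabetically and returns it.'''
--     user_set=set()
--     user_list=[]
--     for line in data_list:
--         user_set.add(line[0])#add each username to the set (wont add duplicates)
--     for item in user_set:
--         user_list.append(item)#add each unique username to a list
--     user_list.sort()#sort the list
--     return user_list
-- ===== SOURCE B (Python) =====
-- def get_user_names(data_list):
--     '''Creates a list of usernames from the file. Sorts alphabetically and returns it.'''
--     names = sorted(line[0] for line in data_list)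
--     result = []
--     for name in names:
--         if not result or result[-1] != name:
--             result.append(name)
--     return result
-- ===== Notes on version B (the rewrite author's own statement) =====
-- stated objective: simpler
-- what changed: B sorts the raw username list (duplicates included) and removes adjacent duplicates in one linear pass, instead of deduplicating through a set before sorting.
import Mathlib
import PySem

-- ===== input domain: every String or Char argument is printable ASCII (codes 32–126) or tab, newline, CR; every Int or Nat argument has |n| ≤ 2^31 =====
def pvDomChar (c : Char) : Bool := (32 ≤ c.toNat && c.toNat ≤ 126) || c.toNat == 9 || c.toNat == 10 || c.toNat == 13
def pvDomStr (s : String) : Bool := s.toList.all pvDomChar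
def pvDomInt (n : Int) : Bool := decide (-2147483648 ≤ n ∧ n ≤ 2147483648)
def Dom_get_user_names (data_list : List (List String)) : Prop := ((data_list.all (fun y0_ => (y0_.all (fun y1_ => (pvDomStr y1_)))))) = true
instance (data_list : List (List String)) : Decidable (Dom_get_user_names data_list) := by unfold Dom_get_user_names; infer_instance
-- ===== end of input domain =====

-- B sorts the raw username list (duplicates included) and removes adjacent duplicates
-- in one linear pass, instead of deduplicating through a set before sorting (objective: simpler).

-- ===== PORT A =====
-- line[0] is total under Pre_ (every line nonempty), so pyGetD is exact there.
def get_user_names (data_list : List (List String)) : List String :=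
  let user_set : PySem.Set String :=
    data_list.foldl (fun s line => PySem.Set.add s (PySem.List.pyGetD line 0 "")) PySem.Set.empty
  let user_list : List String :=
    user_set.foldl (fun acc item => acc ++ [item]) []
  PySem.List.sorted user_list (fun x => x) false

-- ===== PORT B =====
def get_user_names_alt (data_list : List (List String)) : List String :=
  let names : List String :=
    PySem.List.sorted (data_list.map (fun line => PySem.List.pyGetD line 0 "")) (fun x => x) false
  names.foldl (fun result name =>
    if result.getLast? == some name then result else result ++ [name]) []

-- ===== PRECONDITION & SPEC =====
-- Pre_ excludes inputs containing an empty inner list, on which both A and B raise IndexError at line[0].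
def Pre_get_user_names (data_list : List (List String)) : Prop :=
  ∀ line ∈ data_list, line ≠ []
instance (data_list : List (List String)) : Decidable (Pre_get_user_names data_list) := by
  unfold Pre_get_user_names; infer_instance
def pvWitness_get_user_names : List (List String) := [["bob", "3"], ["amy", "1"], ["bob", "2"]]

def Spec_get_user_names (data_list : List (List String)) (out : List String) : Prop :=
  out = get_user_names_alt data_list
instance (data_list : List (List String)) (out : List String) : Decidable (Spec_get_user_names data_list out) := by
  unfold Spec_get_user_names; infer_instance

-- ===== CLAIM (what is proved, stated in full; the proofs are below) =====
def Claim_equal_get_user_names : Prop := ∀ (data_list : List (List String)), Dom_get_user_names data_list → Pre_get_user_names data_list → Spec_get_user_names data_list (get_user_names data_list)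

-- ===== LEMMAS AND PROOFS =====

-- structural form of B's dedup fold: `dd a l` = the elements appended after the last one is `a`
def dd : String → List String → List String
  | _, [] => []
  | a, x :: xs => if a = x then dd a xs else x :: dd x xs

theorem foldl_dedup_eq_dd (l : List String) :
    ∀ (acc : List String) (a : String), acc.getLast? = some a →
      l.foldl (fun result name =>
        if result.getLast? == some name then result else result ++ [name]) acc
      = acc ++ dd a l := by
  induction l with
  | nil => intro acc a _; simp [dd]
  | cons x xs ih =>
    intro acc a hlast
    simp only [List.foldl_cons, dd, hlast]
    by_cases hax : a = x
    · subst hax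
      rw [if_pos rfl]
      have : ((some a == some a)) = true := by simp
      simp only [this, if_pos]
      exact ih acc a hlast
    · rw [if_neg hax]
      have : ((some a == some x)) = false := by simp [hax]
      simp only [this, Bool.false_eq_true, if_false]
      rw [ih (acc ++ [x]) x (by simp)]
      simp

theorem mem_dd (a : String) (l : List String) :
    ∀ x, x ∈ a :: dd a l ↔ x ∈ a :: l := by
  induction l generalizing a with
  | nil => intro x; simp [dd]
  | cons y ys ih =>
    intro x
    simp only [dd]
    by_cases hay : a = y
    · rw [if_pos hay]
      subst hay
      have h2 := ih a x
      simp only [List.mem_cons] at h2 ⊢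
      tauto
    · rw [if_neg hay]
      have h2 := ih y x
      simp only [List.mem_cons] at h2 ⊢
      tauto

theorem pairwise_dd (a : String) (l : List String) :
    (a :: l).Pairwise (fun p q : String => p ≤ q) →
      (a :: dd a l).Pairwise (fun p q : String => p < q) := by
  induction l generalizing a with
  | nil => intro _; simp [dd]
  | cons y ys ih =>
    intro h
    have h' : (a :: ys).Pairwise (fun p q : String => p ≤ q) := by
      rcases List.pairwise_cons.mp h with ⟨ha, hy⟩
      exact List.pairwise_cons.mpr ⟨fun z hz => ha z (List.mem_cons_of_mem _ hz),
        (List.pairwise_cons.mp hy).2⟩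
    simp only [dd]
    by_cases hay : a = y
    · rw [if_pos hay]
      subst hay
      exact ih a h'
    · rw [if_neg hay]
      have hlt : a < y := lt_of_le_of_ne ((List.pairwise_cons.mp h).1 y (by simp)) hay
      have hyrec : (y :: dd y ys).Pairwise (fun p q : String => p < q) :=
        ih y (List.pairwise_cons.mp h).2
      refine List.pairwise_cons.mpr ⟨?_, hyrec⟩
      intro z hz
      have hz' : z ∈ y :: ys := (mem_dd y ys z).mp hz
      rcases List.mem_cons.mp hz' with h1 | h1
      · exact h1 ▸ hlt
      · exact lt_of_lt_of_le hlt ((List.pairwise_cons.mp (List.pairwise_cons.mp h).2).1 z h1)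

theorem nodup_of_pairwise_lt (l : List String)
    (h : l.Pairwise (fun p q : String => p < q)) : l.Nodup :=
  h.imp (fun hpq => ne_of_lt hpq)

theorem dedup_of_sorted (names0 : List String) :
    (PySem.List.sorted names0 (fun x => x) false).foldl (fun result name =>
        if result.getLast? == some name then result else result ++ [name]) []
      = PySem.List.sorted (PySem.Set.ofList names0) (fun x => x) false := by
  have hpw : (PySem.List.sorted names0 (fun x => x) false).Pairwise
      (fun p q : String => p ≤ q) := by
    simpa using PySem.List.sorted_pairwise names0 (fun x => x)
  have hperm : (PySem.List.sorted names0 (fun x => x) false).Perm names0 :=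
    PySem.List.sorted_perm names0 (fun x => x) false
  cases h : PySem.List.sorted names0 (fun x => x) false with
  | nil =>
    have h0 : names0 = [] := (PySem.List.sorted_eq_nil_iff names0 (fun x => x) false).mp h
    simp [h0, PySem.Set.ofList, PySem.List.sorted]
  | cons x xs =>
    rw [h] at hpw hperm
    simp only [List.foldl_cons]
    rw [show (if (([] : List String).getLast? == some x) = true then ([] : List String)
          else [] ++ [x]) = [x] from by simp]
    rw [foldl_dedup_eq_dd xs [x] x (by simp)]
    have hlt : (x :: dd x xs).Pairwise (fun p q : String => p < q) := pairwise_dd x xs hpw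
    rw [List.singleton_append]
    symm
    apply PySem.List.sorted_eq_of_perm_of_pairwise_lt
    · have hnd1 : (x :: dd x xs).Nodup := nodup_of_pairwise_lt _ hlt
      have hnd2 : (PySem.Set.ofList names0).Nodup := PySem.Set.nodup_ofList names0
      refine (List.perm_ext_iff_of_nodup hnd1 hnd2).mpr ?_
      intro z
      rw [mem_dd, PySem.Set.mem_ofList]
      exact hperm.mem_iff
    · simpa using hlt

theorem foldl_append_singleton (l acc : List String) :
    l.foldl (fun acc item => acc ++ [item]) acc = acc ++ l := by
  induction l generalizing acc with
  | nil => simp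
  | cons x xs ih => simp [ih]

-- ===== VERDICT (by name: the statement is the Claim_ definition above) =====
theorem get_user_names_spec : Claim_equal_get_user_names := by
  intro data_list _ _
  unfold Spec_get_user_names get_user_names get_user_names_alt
  rw [dedup_of_sorted]
  have hset :
      data_list.foldl (fun s line => PySem.Set.add s (PySem.List.pyGetD line 0 "")) PySem.Set.empty
        = PySem.Set.ofList (data_list.map (fun line => PySem.List.pyGetD line 0 "")) := by
    rw [PySem.Set.ofList_eq_foldl, ← List.foldl_map]
    rfl
  simp only [hset]
  rw [foldl_append_singleton]
  simp
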